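-- pv_equiv track=rewrite | github.com/recepcanaltinbag/trap-seq | insert_finder_from_bam.py | find_large_insertions
-- ===== SOURCE A (Python) =====
-- def find_large_insertions(cigar_tuples, query_start, insertion_threshold):
--     insertion_positions = []
--     query_pos = query_start
--
--     for cigar_type, length in cigar_tuples:
--         if cigar_type == 0:  # Match (alignment)
--             query_pos += length
--         elif cigar_type == 1:  # Insertion
--             if length > insertion_threshold:  # If insertion is higher than threshold
--                 insertion_positions.append((query_pos, length))
--         elif cigar_type == 2:  # Deletion
--             continue  # Deletion do not affect query pos
--         elif cigar_type == 4 or cigar_type == 5: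
--             query_pos += length
--
--     return insertion_positions
-- ===== SOURCE B (Python) =====
-- def find_large_insertions(cigar_tuples, query_start, insertion_threshold):
--     # Pass 1: exclusive prefix of query positions (0/4/5 advance the cursor).
--     starts = []
--     pos = query_start
--     for cigar_type, length in cigar_tuples:
--         starts.append(pos)
--         if cigar_type in (0, 4, 5):
--             pos += length
--     # Pass 2: select large insertions, stamped with their precomputed position.
--     return [(p, length) for (cigar_type, length), p in zip(cigar_tuples, starts)
--             if cigar_type == 1 and length > insertion_threshold]
-- ===== Notes on version B (the rewrite author's own statement) =====
-- stated objective: alternative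
-- what changed: Replaced the single accumulating scan that appends results in-flight by a two-pass decomposition: first an exclusive prefix-sum table of query positions, then a separate comprehension over tuples zipped with their precomputed starts.
import Mathlib
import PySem

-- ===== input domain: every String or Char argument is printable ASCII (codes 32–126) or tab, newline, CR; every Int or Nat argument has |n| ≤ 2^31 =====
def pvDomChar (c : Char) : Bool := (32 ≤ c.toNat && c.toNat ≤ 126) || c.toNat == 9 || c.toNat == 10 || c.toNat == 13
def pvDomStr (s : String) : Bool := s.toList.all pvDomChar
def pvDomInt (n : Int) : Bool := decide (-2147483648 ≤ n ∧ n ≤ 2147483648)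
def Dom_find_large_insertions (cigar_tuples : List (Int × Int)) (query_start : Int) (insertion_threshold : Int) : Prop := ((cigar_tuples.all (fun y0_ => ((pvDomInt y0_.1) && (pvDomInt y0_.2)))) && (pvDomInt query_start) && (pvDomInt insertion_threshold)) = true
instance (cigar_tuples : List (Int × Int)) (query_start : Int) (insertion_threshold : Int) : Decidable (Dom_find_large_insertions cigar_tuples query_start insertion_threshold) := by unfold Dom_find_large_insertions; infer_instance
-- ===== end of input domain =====

-- B replaces A's single accumulating scan by a two-pass decomposition (exclusive prefix-sum table of query positions, then a filtering comprehension); alternative structure, same cost.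


-- ===== PORT A =====
-- literal transliteration of A: one fold carrying (insertion_positions, query_pos), branches in source order
def find_large_insertions (cigar_tuples : List (Int × Int)) (query_start : Int) (insertion_threshold : Int) : List (Int × Int) :=
  (cigar_tuples.foldl (fun (st : List (Int × Int) × Int) tl =>
      if tl.1 = 0 then (st.1, st.2 + tl.2)
      else if tl.1 = 1 then
        (if tl.2 > insertion_threshold then (st.1 ++ [(st.2, tl.2)], st.2) else st)
      else if tl.1 = 2 then st
      else if tl.1 = 4 ∨ tl.1 = 5 then (st.1, st.2 + tl.2)
      else st)
    ([], query_start)).1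

-- ===== PORT B =====
-- pass 1 of Source B: exclusive prefix table of query positions
def pvStarts (cigar_tuples : List (Int × Int)) (pos : Int) : List Int :=
  match cigar_tuples with
  | [] => []
  | tl :: rest =>
      pos :: pvStarts rest (if tl.1 = 0 ∨ tl.1 = 4 ∨ tl.1 = 5 then pos + tl.2 else pos)

-- pass 2 of Source B: comprehension over tuples zipped with their starts
def find_large_insertions_alt (cigar_tuples : List (Int × Int)) (query_start : Int) (insertion_threshold : Int) : List (Int × Int) :=
  (cigar_tuples.zip (pvStarts cigar_tuples query_start)).filterMap
    (fun x => if x.1.1 = 1 ∧ x.1.2 > insertion_threshold then some (x.2, x.1.2) else none)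

-- ===== PRECONDITION & SPEC =====
def Spec_find_large_insertions (cigar_tuples : List (Int × Int)) (query_start : Int) (insertion_threshold : Int) (out : List (Int × Int)) : Prop := out = find_large_insertions_alt cigar_tuples query_start insertion_threshold
instance (cigar_tuples : List (Int × Int)) (query_start : Int) (insertion_threshold : Int) (out : List (Int × Int)) : Decidable (Spec_find_large_insertions cigar_tuples query_start insertion_threshold out) := by unfold Spec_find_large_insertions; infer_instance

-- ===== CLAIM (what is proved, stated in full; the proofs are below) =====
def Claim_equal_find_large_insertions : Prop := ∀ (cigar_tuples : List (Int × Int)) (query_start : Int) (insertion_threshold : Int), Dom_find_large_insertions cigar_tuples query_start insertion_threshold → Spec_find_large_insertions cigar_tuples query_start insertion_threshold (find_large_insertions cigar_tuples query_start insertion_threshold)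

-- ===== LEMMAS AND PROOFS =====
-- loop invariant: A's fold from state (acc, pos) produces acc ++ (B's result from pos)
theorem pv_fold_eq (thr : Int) : ∀ (ct : List (Int × Int)) (acc : List (Int × Int)) (pos : Int),
    (ct.foldl (fun (st : List (Int × Int) × Int) tl =>
      if tl.1 = 0 then (st.1, st.2 + tl.2)
      else if tl.1 = 1 then
        (if tl.2 > thr then (st.1 ++ [(st.2, tl.2)], st.2) else st)
      else if tl.1 = 2 then st
      else if tl.1 = 4 ∨ tl.1 = 5 then (st.1, st.2 + tl.2)
      else st) (acc, pos)).1
    = acc ++ (ct.zip (pvStarts ct pos)).filterMap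
        (fun x => if x.1.1 = 1 ∧ x.1.2 > thr then some (x.2, x.1.2) else none) := by
  intro ct
  induction ct with
  | nil => intro acc pos; simp [pvStarts]
  | cons tl rest ih =>
      intro acc pos
      simp only [List.foldl_cons, pvStarts, List.zip_cons_cons, List.filterMap_cons]
      by_cases h0 : tl.1 = 0
      · simp [h0, ih]
      · by_cases h1 : tl.1 = 1
        · by_cases hb : tl.2 > thr
          · simp [h1, hb, ih]
          · simp [h1, hb, ih]
        · by_cases h2 : tl.1 = 2
          · simp [h2, ih]
          · by_cases h45 : tl.1 = 4 ∨ tl.1 = 5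
            · simp [h0, h1, h2, h45, ih]
            · simp [h0, h1, h2, h45, ih]

-- ===== VERDICT (by name: the statement is the Claim_ definition above) =====
theorem find_large_insertions_spec : Claim_equal_find_large_insertions := by
  intro ct qs thr _
  unfold Spec_find_large_insertions find_large_insertions find_large_insertions_alt
  simpa using pv_fold_eq thr ct [] qs
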